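-- pv_equiv track=rewrite | github.com/Flopz-Project/flopz | flopz/arch/arm/thumb/instructions.py | decode_from_12b_imm
-- ===== SOURCE A (Python) =====
-- def decode_from_12b_imm(encoded: int) -> int:
--     encoded &= 0xFFF
--
--     if encoded >> 10 == 0:
--         if encoded >> 8 == 0:
--             return encoded
--         elif encoded >> 8 == 1:
--             encoded &= 0xFF
--             return (encoded << 16) + encoded
--         elif encoded >> 8 == 2:
--             encoded &= 0xFF
--             return (encoded << 24) + (encoded << 8)
--         elif encoded >> 8 == 3:
--             encoded &= 0xFF
--             return (encoded << 24) + (encoded << 16) + (encoded << 8) + encoded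
--         else:
--             raise ValueError(f"Invalid encoding {encoded} (binary: {encoded:b}).")
--     else:
--         rotations = encoded >> 7
--         unrotated_value = (encoded & 0x7F) + 0x80
--
--         # we can shift left 24 times instead of rotating right 8 times
--         # rotation >= 8, else we would not reach this code
--         rotations -= 8
--         unrotated_value <<= 24
--
--         while rotations > 0:
--             rotations -= 1
--             unrotated_value >>= 1
--
--         return unrotated_value
-- ===== SOURCE B (Python) =====
-- _MULT = (1, 0x00010001, 0x01000100, 0x01010101)
--
-- def decode_from_12b_imm(encoded: int) -> int:
--     encoded &= 0xFFF
--     if encoded < 0x400: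
--         # splat branch: table lookup instead of branch cascade
--         return (encoded & 0xFF) * _MULT[encoded >> 8]
--     # rotated branch: closed-form shift instead of iterative rotation
--     return (0x80 | (encoded & 0x7F)) << (32 - (encoded >> 7))
-- ===== Notes on version B (the rewrite author's own statement) =====
-- stated objective: simpler
-- what changed: Replaces A's four-way branch cascade for the splat case with a single multiplier-table lookup, and replaces A's iterative while-loop rotation with one closed-form left shift computed from the rotation field.
import Mathlib
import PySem

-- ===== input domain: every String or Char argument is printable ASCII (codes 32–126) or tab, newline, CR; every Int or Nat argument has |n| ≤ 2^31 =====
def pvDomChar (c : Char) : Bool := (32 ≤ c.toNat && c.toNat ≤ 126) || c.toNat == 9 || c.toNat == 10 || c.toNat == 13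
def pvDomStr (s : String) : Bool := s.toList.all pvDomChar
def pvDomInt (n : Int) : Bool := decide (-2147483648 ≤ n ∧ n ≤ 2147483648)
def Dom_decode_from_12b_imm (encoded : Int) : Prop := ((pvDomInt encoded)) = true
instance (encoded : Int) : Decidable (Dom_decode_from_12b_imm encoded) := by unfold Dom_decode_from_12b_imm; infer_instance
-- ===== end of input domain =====

-- B replaces A's four-way branch cascade with a multiplier-table lookup and A's
-- iterative rotation loop with one closed-form shift (objective: simpler).


-- ===== PORT A =====
-- the `while rotations > 0: rotations -= 1; unrotated_value >>= 1` loop: it decrements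
-- the counter by exactly 1 per iteration, so it runs rotations.toNat times (structural
-- recursion on that count; exact, incl. rotations ≤ 0 running zero times)
def shiftLoopA : Nat → Int → Int
  | 0, v => v
  | n + 1, v => shiftLoopA n (v >>> (1 : Nat))

def decodeWhileA (rotations : Int) (v : Int) : Int :=
  shiftLoopA rotations.toNat v

-- body of A after `encoded &= 0xFFF`
def decodeBodyA (encoded : Int) : Int :=
  if encoded >>> (10 : Nat) = 0 then
    if encoded >>> (8 : Nat) = 0 then encoded
    else if encoded >>> (8 : Nat) = 1 then
      let e := PySem.Int.band encoded 0xFF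
      (e <<< (16 : Nat)) + e
    else if encoded >>> (8 : Nat) = 2 then
      let e := PySem.Int.band encoded 0xFF
      (e <<< (24 : Nat)) + (e <<< (8 : Nat))
    else if encoded >>> (8 : Nat) = 3 then
      let e := PySem.Int.band encoded 0xFF
      (e <<< (24 : Nat)) + (e <<< (16 : Nat)) + (e <<< (8 : Nat)) + e
    else 0  -- `raise ValueError` is unreachable: encoded >> 10 = 0 forces encoded >> 8 ≤ 3
  else
    let rotations := encoded >>> (7 : Nat)
    let unrotated := PySem.Int.band encoded 0x7F + 0x80
    let rotations := rotations - 8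
    let unrotated := unrotated <<< (24 : Nat)
    decodeWhileA rotations unrotated

def decode_from_12b_imm (encoded : Int) : Int :=
  decodeBodyA (PySem.Int.band encoded 0xFFF)

-- ===== PORT B =====
-- body of B after `encoded &= 0xFFF`; the tuple index is always in range (encoded < 0x400
-- gives encoded >> 8 ∈ {0,1,2,3}), `.getD 0` only totalises the lookup
def decodeBodyB (encoded : Int) : Int :=
  if encoded < 0x400 then
    PySem.Int.band encoded 0xFF *
      (PySem.List.pyGet? [(1 : Int), 0x00010001, 0x01000100, 0x01010101] (encoded >>> (8 : Nat))).getD 0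
  else
    PySem.Int.bor 0x80 (PySem.Int.band encoded 0x7F) <<< (32 - (encoded >>> (7 : Nat))).toNat

def decode_from_12b_imm_alt (encoded : Int) : Int :=
  decodeBodyB (PySem.Int.band encoded 0xFFF)

-- ===== PRECONDITION & SPEC =====
def Spec_decode_from_12b_imm (encoded : Int) (out : Int) : Prop := out = decode_from_12b_imm_alt encoded
instance (encoded : Int) (out : Int) : Decidable (Spec_decode_from_12b_imm encoded out) := by unfold Spec_decode_from_12b_imm; infer_instance

-- ===== CLAIM (what is proved, stated in full; the proofs are below) =====
def Claim_equal_decode_from_12b_imm : Prop := ∀ (encoded : Int), Dom_decode_from_12b_imm encoded → Spec_decode_from_12b_imm encoded (decode_from_12b_imm encoded)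

-- ===== LEMMAS AND PROOFS =====
lemma band_fff_bounds (a : Int) :
    0 ≤ PySem.Int.band a 0xFFF ∧ PySem.Int.band a 0xFFF < 4096 := by
  unfold PySem.Int.band
  have hb : a.toNat &&& Int.toNat 4095 ≤ 4095 := Nat.and_le_right
  split_ifs with h1 h2 <;> norm_num <;> omega

set_option maxRecDepth 100000 in
set_option maxHeartbeats 1000000 in
lemma body_eq_chunk : ∀ k : Nat, k < 16 → ∀ r : Nat, r < 256 →
    decodeBodyA ((256 * k + r : Nat) : Int) = decodeBodyB ((256 * k + r : Nat) : Int) := by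
  decide

lemma body_eq : ∀ n : Nat, n < 4096 → decodeBodyA (n : Int) = decodeBodyB (n : Int) := by
  intro n h
  have hn : n = 256 * (n / 256) + n % 256 := by omega
  have := body_eq_chunk (n / 256) (by omega) (n % 256) (by omega)
  rwa [← hn] at this

-- ===== VERDICT (by name: the statement is the Claim_ definition above) =====
theorem decode_from_12b_imm_spec : Claim_equal_decode_from_12b_imm := by
  intro encoded _
  unfold Spec_decode_from_12b_imm decode_from_12b_imm decode_from_12b_imm_alt
  obtain ⟨h0, h1⟩ := band_fff_bounds encoded
  obtain ⟨n, hn⟩ := Int.eq_ofNat_of_zero_le h0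
  rw [hn]
  exact body_eq n (by omega)
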